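-- pv_equiv track=rewrite | github.com/linzeyang/leetcode-solutions | medium/3523.py | maximumPossibleSize
-- ===== SOURCE A (Python) =====
-- from typing import List
--
-- def maximumPossibleSize(nums: List[int]) -> int:
--     length = len(nums)
--
--     if length == 1:
--         return 1
--
--     current_max = nums[0]
--
--     num_of_odd = 0
--
--     for idx in range(1, length):
--         if nums[idx] >= current_max:
--             current_max = nums[idx]
--         else:
--             num_of_odd += 1
--
--     return length - num_of_odd
-- ===== SOURCE B (Python) =====
-- from typing import List
--
-- def maximumPossibleSize(nums: List[int]) -> int:
--     def rec(seg: List[int], bound: int) -> int: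
--         if len(seg) == 1:
--             return 1 if seg[0] >= bound else 0
--         mid = len(seg) // 2
--         left = seg[:mid]
--         right = seg[mid:]
--         return rec(left, bound) + rec(right, max(bound, max(left)))
--
--     return rec(nums, nums[0])
-- ===== Notes on version B (the rewrite author's own statement) =====
-- stated objective: alternative
-- what changed: Replaces the stateful left-to-right pass (running maximum plus an odd-counter subtracted from the length) by a divide-and-conquer recursion: split the list in half, count record positions in the left half, and recurse on the right half with the bound raised to the maximum of the left half.
import Mathlib
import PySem

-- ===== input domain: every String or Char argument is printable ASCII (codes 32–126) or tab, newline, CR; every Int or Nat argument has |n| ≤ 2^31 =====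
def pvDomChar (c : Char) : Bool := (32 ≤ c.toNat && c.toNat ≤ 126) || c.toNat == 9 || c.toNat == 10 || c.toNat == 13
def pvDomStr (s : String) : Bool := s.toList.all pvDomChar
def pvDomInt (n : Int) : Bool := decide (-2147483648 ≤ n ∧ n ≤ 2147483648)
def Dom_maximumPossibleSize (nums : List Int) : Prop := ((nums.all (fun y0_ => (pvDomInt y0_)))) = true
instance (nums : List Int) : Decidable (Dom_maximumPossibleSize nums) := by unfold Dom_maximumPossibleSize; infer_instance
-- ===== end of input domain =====

-- B replaces A's stateful pass (running max + odd-counter + final subtraction) by divide and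
-- conquer: count record positions in the left half, recurse right with the bound raised to
-- max(left). Pre_ excludes the empty list, where both Pythons raise IndexError.

-- ===== PORT A =====
-- the for-loop over range(1, length): state (current_max, num_of_odd), iterating the tail
def pvLoopA (cm : Int) (odd : Int) : List Int → Int
  | [] => odd
  | x :: xs => if x ≥ cm then pvLoopA x odd xs else pvLoopA cm (odd + 1) xs

def maximumPossibleSize (nums : List Int) : Int :=
  if (nums.length : Int) == 1 then 1
  else
    match nums with
    | [] => 0  -- unreachable: Python raises IndexError at index 0; excluded by Pre_
    | x :: xs => (nums.length : Int) - pvLoopA x 0 xs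

-- ===== PORT B =====
-- max(left): Python max of a nonempty list ([] unreachable, guarded by len(seg)==1 base case)
def pvMaxList : List Int → Int
  | [] => 0
  | x :: xs => xs.foldl max x

-- rec(seg, bound): len(seg)==1 base case, else split at mid = len//2;
-- seg[:mid]/seg[mid:] with 0 ≤ mid ≤ len are exactly take/drop
def pvRec (seg : List Int) (bound : Int) : Int :=
  if _h0 : seg = [] then 0  -- unreachable totality guard: rec is never called on an empty segment
  else if _h1 : seg.length = 1 then (if bound ≤ seg.getD 0 0 then 1 else 0)
  else
    pvRec (seg.take (seg.length / 2)) bound +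
      pvRec (seg.drop (seg.length / 2)) (max bound (pvMaxList (seg.take (seg.length / 2))))
termination_by seg.length
decreasing_by
  · have h0' : seg.length ≠ 0 := by simpa [List.length_eq_zero_iff] using _h0
    simp only [List.length_take]
    omega
  · have h0' : seg.length ≠ 0 := by simpa [List.length_eq_zero_iff] using _h0
    simp only [List.length_drop]
    omega

def maximumPossibleSize_alt (nums : List Int) : Int :=
  match nums with
  | [] => 0  -- unreachable: Python raises IndexError at nums[0]; excluded by Pre_
  | x :: _ => pvRec nums x

-- ===== PRECONDITION & SPEC =====
-- Pre_ excludes only the empty list, on which A raises IndexError reading the first element.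
def Pre_maximumPossibleSize (nums : List Int) : Prop := nums ≠ []
instance (nums : List Int) : Decidable (Pre_maximumPossibleSize nums) := by unfold Pre_maximumPossibleSize; infer_instance
def pvWitness_maximumPossibleSize : List Int := [3, 1, 4, 4, 2]

def Spec_maximumPossibleSize (nums : List Int) (out : Int) : Prop := out = maximumPossibleSize_alt nums
instance (nums : List Int) (out : Int) : Decidable (Spec_maximumPossibleSize nums out) := by unfold Spec_maximumPossibleSize; infer_instance

-- ===== CLAIM (what is proved, stated in full; the proofs are below) =====
def Claim_equal_maximumPossibleSize : Prop := ∀ (nums : List Int), Dom_maximumPossibleSize nums → Pre_maximumPossibleSize nums → Spec_maximumPossibleSize nums (maximumPossibleSize nums)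

-- ===== LEMMAS AND PROOFS =====
-- helper for the proofs only: record count of l relative to a lower bound m,
-- in the same range/filter shape as B's port
def pvCnt (m : Int) (l : List Int) : Int :=
  (((List.range l.length).filter
      (fun k => decide (m ≤ l.getD k 0) &&
        (List.range k).all (fun j => l.getD j 0 ≤ l.getD k 0))).length : Int)

theorem pvCnt_nil (m : Int) : pvCnt m [] = 0 := by simp [pvCnt]

theorem pvAndMax (a b c : Int) :
    (decide (a ≤ c) && decide (b ≤ c)) = decide (max a b ≤ c) := by
  by_cases h1 : a ≤ c <;> by_cases h2 : b ≤ c <;> simp [h1, h2]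
  all_goals omega

theorem pvCnt_cons (m y : Int) (ys : List Int) :
    pvCnt m (y :: ys) = (if m ≤ y then 1 else 0) + pvCnt (max m y) ys := by
  unfold pvCnt
  rw [List.length_cons, List.range_succ_eq_map, List.filter_cons, List.filter_map]
  have hsh : ∀ k : Nat,
      ((fun k => decide (m ≤ (y :: ys).getD k 0) &&
        (List.range k).all (fun j => (y :: ys).getD j 0 ≤ (y :: ys).getD k 0)) ∘ Nat.succ) k
      = (fun k => decide (max m y ≤ ys.getD k 0) &&
        (List.range k).all (fun j => ys.getD j 0 ≤ ys.getD k 0)) k := by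
    intro k
    simp only [Function.comp, List.range_succ_eq_map, List.all_cons, List.all_map,
      List.getD_cons_succ, List.getD_cons_zero]
    simp only [Function.comp_def, List.getD_cons_succ]
    rw [← Bool.and_assoc, pvAndMax]
  rw [List.filter_congr (fun k _ => hsh k)]
  by_cases hm : m ≤ y
  · simp [hm]
    omega
  · simp [hm]

theorem pvLoopA_eq (xs : List Int) : ∀ (m odd : Int),
    pvLoopA m odd xs = odd + (xs.length : Int) - pvCnt m xs := by
  induction xs with
  | nil => intro m odd; simp [pvLoopA, pvCnt_nil]
  | cons x xs ih =>
    intro m odd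
    by_cases h : x ≥ m
    · have hmax : max m x = x := by omega
      rw [pvCnt_cons, hmax, if_pos h]
      simp only [pvLoopA, if_pos h, List.length_cons]
      rw [ih x odd]; push_cast; ring
    · have hmax : max m x = m := by omega
      rw [pvCnt_cons, hmax, if_neg (by omega : ¬ m ≤ x)]
      simp only [pvLoopA, if_neg h, List.length_cons]
      rw [ih m (odd + 1)]; push_cast; ring

theorem pvFoldlMaxComm (xs : List Int) : ∀ (b x : Int),
    max b (xs.foldl max x) = xs.foldl max (max b x) := by
  induction xs with
  | nil => intro b x; rfl
  | cons y ys ih =>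
    intro b x
    simp only [List.foldl_cons]
    rw [ih b (max x y), ← max_assoc]

theorem pvCnt_append (l2 : List Int) : ∀ (l1 : List Int) (m : Int),
    pvCnt m (l1 ++ l2) = pvCnt m l1 + pvCnt (l1.foldl max m) l2 := by
  intro l1
  induction l1 with
  | nil => intro m; simp [pvCnt_nil]
  | cons y ys ih =>
    intro m
    rw [List.cons_append, pvCnt_cons, pvCnt_cons, ih, List.foldl_cons]
    ring

theorem pvRec_eq (n : Nat) : ∀ (seg : List Int) (bound : Int), seg.length ≤ n → seg ≠ [] →
    pvRec seg bound = pvCnt bound seg := by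
  induction n with
  | zero => intro seg bound hle hne; cases seg with
    | nil => exact absurd rfl hne
    | cons x xs => simp at hle
  | succ n ih =>
    intro seg bound hle hne
    rw [pvRec, dif_neg hne]
    by_cases h1 : seg.length = 1
    · rw [dif_pos h1]
      match seg, h1 with
      | [a], _ => rw [pvCnt_cons, pvCnt_nil]; simp
    · rw [dif_neg h1]
      have hlen : 2 ≤ seg.length := by
        cases hsl : seg.length with
        | zero => exact absurd (List.length_eq_zero_iff.mp hsl) hne
        | succ k => omega
      have hmid1 : 1 ≤ seg.length / 2 := by omega
      have hmid2 : seg.length / 2 < seg.length := by omega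
      have htd : seg.take (seg.length / 2) ++ seg.drop (seg.length / 2) = seg :=
        List.take_append_drop _ _
      have htne : seg.take (seg.length / 2) ≠ [] := by
        intro h
        have := congrArg List.length h
        simp only [List.length_take, List.length_nil] at this
        omega
      have hdne : seg.drop (seg.length / 2) ≠ [] := by
        intro h
        have := congrArg List.length h
        simp only [List.length_drop, List.length_nil] at this
        omega
      have hlt : (seg.take (seg.length / 2)).length ≤ n := by
        simp only [List.length_take]; omega
      have hld : (seg.drop (seg.length / 2)).length ≤ n := by
        simp only [List.length_drop]; omega
      rw [ih _ bound hlt htne, ih _ _ hld hdne]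
      have hfold : max bound (pvMaxList (seg.take (seg.length / 2)))
          = (seg.take (seg.length / 2)).foldl max bound := by
        match htake : seg.take (seg.length / 2), htne with
        | y :: ys, _ =>
          simp only [pvMaxList, List.foldl_cons]
          exact pvFoldlMaxComm ys bound y
      rw [hfold]
      conv_rhs => rw [← htd]
      rw [pvCnt_append]

-- ===== VERDICT (by name: the statement is the Claim_ definition above) =====
theorem maximumPossibleSize_spec : Claim_equal_maximumPossibleSize := by
  intro nums _ hpre
  unfold Spec_maximumPossibleSize
  match nums with
  | [] => exact absurd rfl hpre
  | x :: xs =>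
    have hb : maximumPossibleSize_alt (x :: xs) = 1 + pvCnt x xs := by
      show pvRec (x :: xs) x = 1 + pvCnt x xs
      rw [pvRec_eq (x :: xs).length (x :: xs) x le_rfl (by simp), pvCnt_cons, max_self]
      simp
    rw [hb]
    simp only [maximumPossibleSize]
    by_cases h1 : (((x :: xs).length : Int) == 1) = true
    · rw [if_pos h1]
      have hx : xs = [] := by
        cases xs with
        | nil => rfl
        | cons y ys =>
          exfalso
          simp only [List.length_cons, beq_iff_eq] at h1
          omega
      subst hx
      simp [pvCnt_nil]
    · rw [if_neg h1, pvLoopA_eq xs x 0]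
      simp only [List.length_cons]
      push_cast; ring
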